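-- pv_equiv track=rewrite | github.com/li-plus/rouge-metric | rouge_metric/py_rouge.py | _skip_bigrams
-- ===== SOURCE A (Python) =====
-- import collections
--
-- def _skip_bigrams(sent, skip_gap):
--     # type: (List[str], Optional[int]) -> NGramsType
--     bigrams = collections.Counter()
--     if skip_gap is None or skip_gap < 0:
--         skip_gap = len(sent)
--     for lo in range(len(sent)):
--         for hi in range(lo + 1, min(len(sent), lo + skip_gap + 2)):
--             bigrams[(sent[lo], sent[hi])] += 1
--     return bigrams
-- ===== SOURCE B (Python) =====
-- import collections
--
--
-- def _skip_bigrams(sent, skip_gap):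
--     # type: (List[str], Optional[int]) -> NGramsType
--     # Streaming single pass: keep the next skip_gap+1 candidate words in a
--     # bounded deque instead of re-indexing the list with nested range loops.
--     if skip_gap is None or skip_gap < 0:
--         skip_gap = len(sent)
--     bigrams = collections.Counter()
--     window = collections.deque(sent[:skip_gap + 2])
--     for nxt in sent[skip_gap + 2:]:
--         first = window.popleft()
--         bigrams.update((first, y) for y in window)
--         window.append(nxt)
--     while window:
--         first = window.popleft()
--         bigrams.update((first, y) for y in window)
--     return bigrams
-- ===== Notes on version B (the rewrite author's own statement) =====
-- stated objective: alternative
-- what changed: B replaces A's nested index-range loops over the list by a single streaming pass that maintains the next skip_gap+1 candidate words in a bounded deque, popping the front word and pairing it with the buffer contents, with a drain phase at the end; no list indexing or per-position window-bound min() computation remains.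
import Mathlib
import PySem

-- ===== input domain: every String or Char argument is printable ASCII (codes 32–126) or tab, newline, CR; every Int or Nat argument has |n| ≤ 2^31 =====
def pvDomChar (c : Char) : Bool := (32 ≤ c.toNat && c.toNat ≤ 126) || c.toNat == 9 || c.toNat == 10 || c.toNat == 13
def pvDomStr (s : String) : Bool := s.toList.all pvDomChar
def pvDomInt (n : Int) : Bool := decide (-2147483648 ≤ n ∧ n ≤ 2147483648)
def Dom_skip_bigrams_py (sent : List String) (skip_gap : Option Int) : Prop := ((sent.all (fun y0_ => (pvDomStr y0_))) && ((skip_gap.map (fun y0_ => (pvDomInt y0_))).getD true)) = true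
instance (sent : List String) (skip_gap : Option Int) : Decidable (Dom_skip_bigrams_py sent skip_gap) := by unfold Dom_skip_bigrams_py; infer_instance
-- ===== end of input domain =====

-- B replaces A's nested index loops by one streaming pass that keeps the next skip_gap+1
-- candidate words in a bounded buffer (Python deque), popping the front word and pairing
-- it with the buffer (objective: alternative — no indexing, bounded lookahead buffer).

-- ===== PORT A =====
def skip_bigrams_py (sent : List String) (skip_gap : Option Int) : List (String × String × Int) :=
  let n : Int := PySem.List.len sent
  let g : Int := match skip_gap with
    | none => n
    | some k => if k < 0 then n else k
  let bigrams : PySem.Dict (String × String) Int :=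
    (PySem.List.pyRange 0 n).foldl (fun d lo =>
      (PySem.List.pyRange (lo + 1) (min n (lo + g + 2))).foldl (fun d hi =>
        d.modify (PySem.List.pyGetD sent lo "", PySem.List.pyGetD sent hi "") 0 (· + 1)) d)
      PySem.Dict.empty
  bigrams.items.map (fun q => (q.1.1, q.1.2, q.2))

-- ===== PORT B =====
-- the trailing 'while window:' loop of Source B: pop the front word, pair it with the buffer
def skip_bigrams_drain (window : List String) (d : PySem.Dict (String × String) Int) :
    PySem.Dict (String × String) Int :=
  match window with
  | [] => d
  | first :: rest =>
      skip_bigrams_drain rest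
        ((rest.map (fun y => (first, y))).foldl (fun d p => d.modify p 0 (· + 1)) d)

def skip_bigrams_py_alt (sent : List String) (skip_gap : Option Int) : List (String × String × Int) :=
  let g : Int := match skip_gap with
    | none => PySem.List.len sent
    | some k => if k < 0 then PySem.List.len sent else k
  -- window = deque(sent[:g+2]); the for-loop consumes sent[g+2:]
  let st := (sent.drop (g + 2).toNat).foldl
    (fun (st : List String × PySem.Dict (String × String) Int) (nxt : String) =>
      match st with
      | (first :: rest, d) =>
          (rest ++ [nxt], (rest.map (fun y => (first, y))).foldl (fun d p => d.modify p 0 (· + 1)) d)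
      | ([], d) => ([], d))  -- unreachable: the buffer is nonempty whenever the loop still has input
    (sent.take (g + 2).toNat, PySem.Dict.empty)
  (skip_bigrams_drain st.1 st.2).items.map (fun q => (q.1.1, q.1.2, q.2))

-- ===== PRECONDITION & SPEC =====
def Spec_skip_bigrams_py (sent : List String) (skip_gap : Option Int) (out : List (String × String × Int)) : Prop := out = skip_bigrams_py_alt sent skip_gap
instance (sent : List String) (skip_gap : Option Int) (out : List (String × String × Int)) : Decidable (Spec_skip_bigrams_py sent skip_gap out) := by unfold Spec_skip_bigrams_py; infer_instance

-- ===== CLAIM (what is proved, stated in full; the proofs are below) =====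
def Claim_equal_skip_bigrams_py : Prop := ∀ (sent : List String) (skip_gap : Option Int), Dom_skip_bigrams_py sent skip_gap → Spec_skip_bigrams_py sent skip_gap (skip_bigrams_py sent skip_gap)

-- ===== LEMMAS AND PROOFS =====

-- the multiset of window pairs of a sentence, in A's (lo-major) enumeration order:
-- each word paired with the next w-1 words
def pvFP (w : Nat) : List String → List (String × String)
  | [] => []
  | x :: t => (t.take (w - 1)).map (fun y => (x, y)) ++ pvFP w t

-- Folding f over the values xs[j] for j in range(a, b) (0 ≤ a, b ≤ len xs) is folding f
-- over the first (b-a).toNat elements of xs.drop a.toNat.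
lemma foldl_pyRange_getD_take {α β : Type} (xs : List α) (dflt : α) (f : β → α → β) :
    ∀ (k : Nat) (a b : Int) (init : β), 0 ≤ a → b ≤ (xs.length : Int) → (b - a).toNat = k →
    (PySem.List.pyRange a b).foldl (fun acc j => f acc (PySem.List.pyGetD xs j dflt)) init
      = ((xs.drop a.toNat).take k).foldl f init := by
  intro k
  induction k with
  | zero =>
    intro a b init ha hb hk
    rw [PySem.List.pyRange_one_eq_nil (by omega)]
    simp
  | succ k ih =>
    intro a b init ha hb hk
    have hab : a < b := by omega
    have haLen : a < (xs.length : Int) := by omega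
    rw [PySem.List.pyRange_one_cons hab]
    rw [List.drop_eq_getElem_cons (by omega : a.toNat < xs.length)]
    simp only [List.foldl_cons, List.take_succ_cons]
    rw [PySem.List.pyGetD_eq_getElem xs dflt ha haLen]
    have hdrop : (a + 1).toNat = a.toNat + 1 := by omega
    rw [← hdrop]
    exact ih (a + 1) b _ (by omega) hb (by omega)

-- A's nested loops tally exactly the pair list pvFP (prefix-generalised: the outer loop
-- starts at position |pre| of pre ++ t)
lemma a_loop_eq (g : Int) (hg : 0 ≤ g) :
    ∀ (t pre : List String) (d : PySem.Dict (String × String) Int),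
    (PySem.List.pyRange (pre.length : Int) (PySem.List.len (pre ++ t))).foldl (fun d lo =>
        (PySem.List.pyRange (lo + 1) (min (PySem.List.len (pre ++ t)) (lo + g + 2))).foldl (fun d hi =>
          d.modify (PySem.List.pyGetD (pre ++ t) lo "", PySem.List.pyGetD (pre ++ t) hi "") 0 (· + 1)) d) d
      = (pvFP (g + 2).toNat t).foldl (fun d p => d.modify p 0 (· + 1)) d := by
  intro t
  induction t with
  | nil =>
    intro pre d
    rw [PySem.List.pyRange_one_eq_nil (by simp [PySem.List.len])]
    simp [pvFP]
  | cons x t' ih =>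
    intro pre d
    have hsent : pre ++ x :: t' = (pre ++ [x]) ++ t' := by simp
    have hplen : ((pre ++ [x]).length : Int) = (pre.length : Int) + 1 := by simp
    rw [hsent]
    have hlen : PySem.List.len ((pre ++ [x]) ++ t') = (pre.length : Int) + 1 + (t'.length : Int) := by
      simp [PySem.List.len]; ring
    rw [PySem.List.pyRange_one_cons (by rw [hlen]; omega), List.foldl_cons]
    rw [foldl_pyRange_getD_take ((pre ++ [x]) ++ t') ""
          (fun d y => d.modify (PySem.List.pyGetD ((pre ++ [x]) ++ t') (pre.length : Int) "", y) 0 (· + 1))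
          ((min (PySem.List.len ((pre ++ [x]) ++ t')) ((pre.length : Int) + g + 2)) - ((pre.length : Int) + 1)).toNat
          ((pre.length : Int) + 1) (min (PySem.List.len ((pre ++ [x]) ++ t')) ((pre.length : Int) + g + 2))
          d (by omega) (by rw [PySem.List.len_eq] at hlen ⊢; omega) rfl]
    have hx : PySem.List.pyGetD ((pre ++ [x]) ++ t') (pre.length : Int) "" = x := by
      rw [PySem.List.pyGetD_natCast, List.append_assoc,
        List.getD_eq_getElem?_getD, List.getElem?_append_right (le_refl _)]
      simp
    have hdrop : ((pre ++ [x]) ++ t').drop ((pre.length : Int) + 1).toNat = t' := by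
      have h1 : ((pre.length : Int) + 1).toNat = (pre ++ [x]).length := by simp
      rw [h1, List.drop_left]
    have hk : ((min (PySem.List.len ((pre ++ [x]) ++ t')) ((pre.length : Int) + g + 2)) - ((pre.length : Int) + 1)).toNat
        = min t'.length ((g + 2).toNat - 1) := by
      rw [hlen]
      omega
    rw [hx, hdrop, hk, ← List.take_take, List.take_of_length_le (by simp)]
    rw [show (pre.length : Int) + 1 = ((pre ++ [x]).length : Int) by simp]
    rw [ih (pre ++ [x])]
    rw [pvFP, List.foldl_append, List.foldl_map]

-- draining a buffer no longer than w tallies exactly its pvFP pair list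
lemma drain_eq (w : Nat) :
    ∀ (xs : List String), xs.length ≤ w → ∀ (d : PySem.Dict (String × String) Int),
    skip_bigrams_drain xs d = (pvFP w xs).foldl (fun d p => d.modify p 0 (· + 1)) d := by
  intro xs
  induction xs with
  | nil => intro _ d; simp [pvFP, skip_bigrams_drain]
  | cons x t ih =>
    intro hlen d
    have htake : t.take (w - 1) = t := List.take_of_length_le (by simp at hlen; omega)
    rw [skip_bigrams_drain, pvFP, htake, List.foldl_append]
    exact ih (by simp at hlen; omega) _

-- B's for-loop + drain tally the same pair list pvFP, in the same order
lemma b_loop_eq (w : Nat) (hw : 2 ≤ w) :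
    ∀ (xs : List String) (d : PySem.Dict (String × String) Int),
    skip_bigrams_drain
      ((xs.drop w).foldl
        (fun (st : List String × PySem.Dict (String × String) Int) (nxt : String) =>
          match st with
          | (first :: rest, d) =>
              (rest ++ [nxt], (rest.map (fun y => (first, y))).foldl (fun d p => d.modify p 0 (· + 1)) d)
          | ([], d) => ([], d))
        (xs.take w, d)).1
      ((xs.drop w).foldl
        (fun (st : List String × PySem.Dict (String × String) Int) (nxt : String) =>
          match st with
          | (first :: rest, d) =>
              (rest ++ [nxt], (rest.map (fun y => (first, y))).foldl (fun d p => d.modify p 0 (· + 1)) d)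
          | ([], d) => ([], d))
        (xs.take w, d)).2
      = (pvFP w xs).foldl (fun d p => d.modify p 0 (· + 1)) d := by
  intro xs
  induction xs with
  | nil => intro d; simp [pvFP, skip_bigrams_drain]
  | cons x t ih =>
    intro d
    by_cases hlen : (x :: t).length ≤ w
    · rw [List.drop_eq_nil_of_le (by simpa using hlen), List.take_of_length_le (by simpa using hlen)]
      simp only [List.foldl_nil]
      exact drain_eq w (x :: t) hlen d
    · obtain ⟨w', rfl⟩ : ∃ w', w = w' + 1 := ⟨w - 1, by omega⟩
      have hw1 : w' < t.length := by simp at hlen; omega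
      cases hdt : t.drop w' with
      | nil => exact absurd (List.drop_eq_nil_iff.mp hdt) (by omega)
      | cons hd tl =>
        have htl : tl = t.drop (w' + 1) := by
          rw [← List.drop_drop, hdt]; rfl
        have htk : t.take (w' + 1) = t.take w' ++ [hd] := by
          rw [List.take_add, hdt]; rfl
        rw [List.take_succ_cons, List.drop_succ_cons, hdt, List.foldl_cons]
        simp only
        rw [htl, ← htk, ih]
        rw [pvFP, List.foldl_append, List.foldl_map]
        simp only [Nat.add_sub_cancel]
        rw [List.foldl_map]

-- the two tallying dicts coincide (A's nested loops vs B's streaming buffer), for the common g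
lemma pv_dicts_eq (sent : List String) (g : Int) (hg : 0 ≤ g) :
    (PySem.List.pyRange 0 (PySem.List.len sent)).foldl (fun d lo =>
      (PySem.List.pyRange (lo + 1) (min (PySem.List.len sent) (lo + g + 2))).foldl (fun d hi =>
        d.modify (PySem.List.pyGetD sent lo "", PySem.List.pyGetD sent hi "") 0 (· + 1)) d)
      (PySem.Dict.empty : PySem.Dict (String × String) Int)
    = skip_bigrams_drain
        ((sent.drop (g + 2).toNat).foldl
          (fun (st : List String × PySem.Dict (String × String) Int) (nxt : String) =>
            match st with
            | (first :: rest, d) =>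
                (rest ++ [nxt], (rest.map (fun y => (first, y))).foldl (fun d p => d.modify p 0 (· + 1)) d)
            | ([], d) => ([], d))
          (sent.take (g + 2).toNat, PySem.Dict.empty)).1
        ((sent.drop (g + 2).toNat).foldl
          (fun (st : List String × PySem.Dict (String × String) Int) (nxt : String) =>
            match st with
            | (first :: rest, d) =>
                (rest ++ [nxt], (rest.map (fun y => (first, y))).foldl (fun d p => d.modify p 0 (· + 1)) d)
            | ([], d) => ([], d))
          (sent.take (g + 2).toNat, PySem.Dict.empty)).2 := by
  have ha := a_loop_eq g hg sent [] PySem.Dict.empty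
  simp only [List.nil_append, List.length_nil, Nat.cast_zero] at ha
  rw [ha, b_loop_eq (g + 2).toNat (by omega) sent PySem.Dict.empty]

-- ===== VERDICT (by name: the statement is the Claim_ definition above) =====
theorem skip_bigrams_py_spec : Claim_equal_skip_bigrams_py := by
  intro sent skip_gap _
  unfold Spec_skip_bigrams_py skip_bigrams_py skip_bigrams_py_alt
  have hn : (0 : Int) ≤ PySem.List.len sent := by
    rw [PySem.List.len_eq]; exact Int.natCast_nonneg _
  cases skip_gap with
  | none =>
    simp only
    rw [pv_dicts_eq sent (PySem.List.len sent) hn]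
  | some k =>
    by_cases hk : k < 0
    · simp only [if_pos hk]
      rw [pv_dicts_eq sent (PySem.List.len sent) hn]
    · simp only [if_neg hk]
      rw [pv_dicts_eq sent k (by omega)]
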